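-- pv_equiv track=rewrite | github.com/tpankaj/kzpy3.0 | scratch/for_nino/rain_RPi.py | commands_in_frame_sync
-- ===== SOURCE A (Python) =====
-- def commands_in_frame_sync(frame_times,command_times,commands):
--     binned_commands = []
--     for i in range(len(frame_times)-1):
--         command = False
--         ts = frame_times[i:i+2]
--         for j in range(len(command_times)):
--             if command_times[j] >= ts[0] and command_times[j] < ts[1]:
--                 command = commands[j]
--                 break
--         binned_commands.append(command)
--     binned_commands.append(False)
--     return binned_commands
-- ===== SOURCE B (Python) =====
-- def commands_in_frame_sync(frame_times, command_times, commands):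
--     n_bins = len(frame_times) - 1
--     first = {}  # bin index -> index of earliest command falling in that bin
--     for j in range(len(command_times) - 1, -1, -1):
--         t = command_times[j]
--         for i in range(n_bins):
--             if frame_times[i] <= t < frame_times[i + 1]:
--                 first[i] = j
--     return [commands[first[i]] if i in first else False for i in range(n_bins)] + [False]
-- ===== Notes on version B (the rewrite author's own statement) =====
-- stated objective: alternative
-- what changed: B transposes the loops: instead of scanning all command_times for each frame bin with a break, it makes one reverse pass over the commands, recording in a dict the earliest command index per bin, then builds the output from the dict.
import Mathlib
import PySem

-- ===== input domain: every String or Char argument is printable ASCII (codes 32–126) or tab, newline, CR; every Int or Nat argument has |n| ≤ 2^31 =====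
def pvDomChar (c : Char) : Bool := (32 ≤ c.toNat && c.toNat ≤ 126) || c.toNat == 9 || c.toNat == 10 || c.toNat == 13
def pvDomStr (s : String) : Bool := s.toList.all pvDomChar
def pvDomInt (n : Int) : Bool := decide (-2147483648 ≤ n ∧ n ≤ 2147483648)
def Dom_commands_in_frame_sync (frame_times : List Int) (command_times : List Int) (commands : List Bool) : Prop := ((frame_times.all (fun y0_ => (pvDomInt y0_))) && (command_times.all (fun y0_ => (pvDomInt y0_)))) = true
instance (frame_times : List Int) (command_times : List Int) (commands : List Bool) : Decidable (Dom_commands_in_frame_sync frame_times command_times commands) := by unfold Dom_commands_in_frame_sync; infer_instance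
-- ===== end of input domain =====

-- B transposes A's nested scan: one reverse pass over the commands builds a dict of the
-- earliest command index per frame bin; objective: alternative (same asymptotic cost).


-- ===== PORT A =====
-- inner `for j in range(len(command_times))` loop with its break, starting at index j
def pvInnerA (ct : List Int) (cs : List Bool) (t0 t1 : Int) (j : Nat) : Bool :=
  if j < ct.length then
    if t0 ≤ ct.getD j 0 ∧ ct.getD j 0 < t1 then cs.getD j false
    else pvInnerA ct cs t0 t1 (j + 1)
  else false
termination_by ct.length - j

def commands_in_frame_sync (frame_times : List Int) (command_times : List Int) (commands : List Bool) : List Bool :=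
  ((List.range (frame_times.length - 1)).map (fun i =>
      pvInnerA command_times commands (frame_times.getD i 0) (frame_times.getD (i + 1) 0) 0))
    ++ [false]

-- ===== PORT B =====
-- one step of B's reverse pass: record j for every bin i whose interval contains t
def pvRecord (ft : List Int) (nbins : Nat) (first : PySem.Dict Nat Nat) (j : Nat) (t : Int) : PySem.Dict Nat Nat :=
  (List.range nbins).foldl
    (fun d i => if ft.getD i 0 ≤ t ∧ t < ft.getD (i + 1) 0 then d.insert i j else d) first

def commands_in_frame_sync_alt (frame_times : List Int) (command_times : List Int) (commands : List Bool) : List Bool :=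
  let nbins := frame_times.length - 1
  let first : PySem.Dict Nat Nat :=
    (List.range command_times.length).reverse.foldl
      (fun d j => pvRecord frame_times nbins d j (command_times.getD j 0)) PySem.Dict.empty
  ((List.range nbins).map (fun i =>
      match first.get? i with
      | some j => commands.getD j false
      | none => false))
    ++ [false]

-- ===== PRECONDITION & SPEC =====
-- Pre_ excludes exactly the inputs where the Python raises IndexError: some frame bin's
-- earliest matching command index is beyond the end of `commands` (both A and B then
-- evaluate commands[j] for that out-of-range j and raise).
def Pre_commands_in_frame_sync (frame_times : List Int) (command_times : List Int) (commands : List Bool) : Prop :=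
  ((List.range (frame_times.length - 1)).all fun i =>
    (List.range command_times.length).all fun j =>
      !(decide (commands.length ≤ j) &&
        decide (frame_times.getD i 0 ≤ command_times.getD j 0 ∧ command_times.getD j 0 < frame_times.getD (i + 1) 0)) ||
      (List.range j).any fun k =>
        decide (frame_times.getD i 0 ≤ command_times.getD k 0 ∧ command_times.getD k 0 < frame_times.getD (i + 1) 0)) = true
instance (frame_times : List Int) (command_times : List Int) (commands : List Bool) : Decidable (Pre_commands_in_frame_sync frame_times command_times commands) := by
  unfold Pre_commands_in_frame_sync; infer_instance

def pvWitness_commands_in_frame_sync : List Int × List Int × List Bool := ([0, 10, 20], [5, 12], [true, false])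

def Spec_commands_in_frame_sync (frame_times : List Int) (command_times : List Int) (commands : List Bool) (out : List Bool) : Prop := out = commands_in_frame_sync_alt frame_times command_times commands
instance (frame_times : List Int) (command_times : List Int) (commands : List Bool) (out : List Bool) : Decidable (Spec_commands_in_frame_sync frame_times command_times commands out) := by unfold Spec_commands_in_frame_sync; infer_instance

-- ===== CLAIM (what is proved, stated in full; the proofs are below) =====
def Claim_equal_commands_in_frame_sync : Prop := ∀ (frame_times : List Int) (command_times : List Int) (commands : List Bool), Dom_commands_in_frame_sync frame_times command_times commands → Pre_commands_in_frame_sync frame_times command_times commands → Spec_commands_in_frame_sync frame_times command_times commands (commands_in_frame_sync frame_times command_times commands)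

-- ===== LEMMAS AND PROOFS =====

-- A's inner loop returns the first match at index ≥ j
theorem pvInnerA_eq_find (ct : List Int) (cs : List Bool) (t0 t1 : Int) :
    ∀ n j, ct.length - j = n →
      pvInnerA ct cs t0 t1 j =
        match (List.range' j n).find? (fun k => decide (t0 ≤ ct.getD k 0 ∧ ct.getD k 0 < t1)) with
        | some k => cs.getD k false
        | none => false := by
  intro n
  induction n with
  | zero =>
    intro j h
    rw [pvInnerA, if_neg (by omega)]
    simp
  | succ m ih =>
    intro j h
    rw [pvInnerA, if_pos (by omega), List.range'_succ, List.find?_cons]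
    by_cases hc : t0 ≤ ct.getD j 0 ∧ ct.getD j 0 < t1
    · rw [if_pos hc]
      have : decide (t0 ≤ ct.getD j 0 ∧ ct.getD j 0 < t1) = true := by simpa using hc
      rw [this]
    · rw [if_neg hc]
      have : decide (t0 ≤ ct.getD j 0 ∧ ct.getD j 0 < t1) = false := by simpa using hc
      rw [this]
      exact ih (j + 1) (by omega)

-- the inner fold of pvRecord at a query key (P abstract so the if-conditions stay atomic)
theorem pvFoldIf_get? {P : Nat → Prop} [DecidablePred P] (j : Nat) (i₀ : Nat) :
    ∀ (M : List Nat) (d : PySem.Dict Nat Nat),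
      (M.foldl (fun d i => if P i then d.insert i j else d) d).get? i₀ =
        if i₀ ∈ M ∧ P i₀ then some j else d.get? i₀ := by
  intro M
  induction M with
  | nil => simp
  | cons m M ih =>
    intro d
    rw [List.foldl_cons, ih]
    by_cases hm : i₀ = m
    · subst hm
      by_cases hc : P i₀ <;> by_cases hM : i₀ ∈ M <;>
        simp [hc, hM, PySem.Dict.get?_insert_self]
    · have hne := PySem.Dict.get?_insert_of_ne d j hm
      by_cases hc2 : P m <;> simp [hc2, hm, hne]

-- the outer fold: the last write to key i₀ comes from the first match in L.reverse
theorem pvFoldRec_get? {R : Nat → Nat → Prop} [inst : ∀ i j, Decidable (R i j)] (nbins : Nat)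
    (i₀ : Nat) (hi : i₀ < nbins) :
    ∀ (L : List Nat) (d : PySem.Dict Nat Nat),
      ((L.foldl (fun d j => (List.range nbins).foldl
          (fun d i => if R i j then d.insert i j else d) d) d).get? i₀) =
        match L.reverse.find? (fun j => decide (R i₀ j)) with
        | some j => some j
        | none => d.get? i₀ := by
  intro L
  induction L with
  | nil => simp
  | cons j L ih =>
    intro d
    rw [List.foldl_cons, ih, List.reverse_cons, List.find?_append]
    cases hfind : L.reverse.find? (fun j => decide (R i₀ j)) with
    | some k => rfl
    | none =>
      rw [Option.none_or, List.find?_singleton]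
      rw [pvFoldIf_get? j i₀ (List.range nbins) d]
      by_cases hc : R i₀ j
      · rw [if_pos ⟨List.mem_range.mpr hi, hc⟩]
        simp [hc]
      · rw [if_neg (by tauto)]
        simp [hc]

-- ===== VERDICT (by name: the statement is the Claim_ definition above) =====
theorem commands_in_frame_sync_spec : Claim_equal_commands_in_frame_sync := by
  intro ft ct cs _ _
  unfold Spec_commands_in_frame_sync commands_in_frame_sync commands_in_frame_sync_alt
  congr 1
  apply List.map_congr_left
  intro i hi
  rw [List.mem_range] at hi
  show pvInnerA ct cs (ft.getD i 0) (ft.getD (i + 1) 0) 0 = _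
  have hfold := pvFoldRec_get?
    (R := fun i j => ft.getD i 0 ≤ ct.getD j 0 ∧ ct.getD j 0 < ft.getD (i + 1) 0)
    (ft.length - 1) i hi (List.range ct.length).reverse PySem.Dict.empty
  simp only [pvRecord] at *
  rw [hfold, List.reverse_reverse,
      pvInnerA_eq_find ct cs _ _ ct.length 0 (by omega), List.range_eq_range']
  cases (List.range' 0 ct.length).find?
      (fun k => decide (ft.getD i 0 ≤ ct.getD k 0 ∧ ct.getD k 0 < ft.getD (i + 1) 0)) <;> rfl
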